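-- pv_equiv track=rewrite | github.com/wh-jung0522/AlgorithmStudy | 1.Hash/4_BestAlbum.py | sumandlist
-- ===== SOURCE A (Python) =====
-- def sumandlist(plays_list,ordered_list):
--     sum = 0
--     best_order = []## playlist order
--     return_order = []
--     for i in range(len(plays_list)):
--         sum+=plays_list[i]
--         if(len(best_order)==0):
--             best_order.append(i)
--         elif(plays_list[best_order[0]]<plays_list[i]):
--             best_order.insert(0,i)
--         elif(len(best_order)==1):
--             best_order.append(i)
--         elif(plays_list[best_order[1]]<plays_list[i]):
--             best_order[1] = i
--
--     return_order.append(ordered_list[best_order[0]])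
--     if (len(ordered_list) > 1):
--         return_order.append(ordered_list[best_order[1]])
--     return sum, return_order
-- ===== SOURCE B (Python) =====
-- def sumandlist(plays_list, ordered_list):
--     # total via builtin sum; top-2 indices via two argmin scans with key (-plays, index)
--     key = lambda i: (-plays_list[i], i)
--     i0 = min(range(len(plays_list)), key=key)
--     return_order = [ordered_list[i0]]
--     if len(ordered_list) > 1:
--         i1 = min((i for i in range(len(plays_list)) if i != i0), key=key)
--         return_order.append(ordered_list[i1])
--     return sum(plays_list), return_order
-- ===== Notes on version B (the rewrite author's own statement) =====
-- stated objective: simpler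
-- what changed: A's single pass that maintains a growing best_order list via insert/append/overwrite is replaced by the builtin sum plus two independent argmin scans with key (-plays, index): one over all indices for the best, one over the remaining indices for the second best.
-- outside the precondition, e.g. on sumandlist([5, 1], [7]): A returns (6, [7]), B returns (6, [7])
import Mathlib
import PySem

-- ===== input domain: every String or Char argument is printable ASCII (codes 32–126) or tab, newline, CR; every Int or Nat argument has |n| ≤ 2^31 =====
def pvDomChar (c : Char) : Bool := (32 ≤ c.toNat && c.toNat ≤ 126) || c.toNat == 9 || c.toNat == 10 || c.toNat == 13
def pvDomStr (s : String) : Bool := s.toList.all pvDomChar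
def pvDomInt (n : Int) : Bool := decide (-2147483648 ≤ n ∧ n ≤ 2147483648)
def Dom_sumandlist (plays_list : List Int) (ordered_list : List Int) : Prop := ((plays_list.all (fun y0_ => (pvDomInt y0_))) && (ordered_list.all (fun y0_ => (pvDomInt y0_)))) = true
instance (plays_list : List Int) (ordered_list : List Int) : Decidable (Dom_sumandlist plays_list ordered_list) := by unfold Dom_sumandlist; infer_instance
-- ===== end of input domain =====

-- B replaces A's incremental top-2 bookkeeping list by builtin sum plus two keyed argmin scans (key (-plays, index)); objective: simpler. Equivalence is about the return value only.

-- ===== PORT A =====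
-- Loop body of A's for-loop; indexing is via pyGetD (every index reached inside
-- Pre_ is in range, so the default is never used there and pyGetD is exact).
def sumandlistStep (plays_list : List Int) (st : Int × List Int) (i : Int) : Int × List Int :=
  let s := st.1 + PySem.List.pyGetD plays_list i 0
  let b := st.2
  if b.length = 0 then (s, b ++ [i])
  else if PySem.List.pyGetD plays_list (PySem.List.pyGetD b 0 0) 0 < PySem.List.pyGetD plays_list i 0 then (s, i :: b)
  else if b.length = 1 then (s, b ++ [i])
  else if PySem.List.pyGetD plays_list (PySem.List.pyGetD b 1 0) 0 < PySem.List.pyGetD plays_list i 0 then (s, b.set 1 i)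
  else (s, b)

def sumandlist (plays_list : List Int) (ordered_list : List Int) : Int × List Int :=
  let st := (PySem.List.pyRange 0 plays_list.length 1).foldl (sumandlistStep plays_list) (0, [])
  let ro := [PySem.List.pyGetD ordered_list (PySem.List.pyGetD st.2 0 0) 0]
  if 1 < ordered_list.length then
    (st.1, ro ++ [PySem.List.pyGetD ordered_list (PySem.List.pyGetD st.2 1 0) 0])
  else (st.1, ro)

-- ===== PORT B =====
-- min(..., key=lambda i: (-plays_list[i], i)) is PySem.List.min2? with the two key
-- components; indexing via pyGetD is exact inside Pre_ (indices always in range there).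
def sumandlist_alt (plays_list : List Int) (ordered_list : List Int) : Int × List Int :=
  let i0 := (PySem.List.min2? (PySem.List.pyRange 0 plays_list.length 1)
              (fun i => -(PySem.List.pyGetD plays_list i 0)) (fun i => i)).getD 0
  let ro := [PySem.List.pyGetD ordered_list i0 0]
  if 1 < ordered_list.length then
    let i1 := (PySem.List.min2? ((PySem.List.pyRange 0 plays_list.length 1).filter (fun i => i != i0))
              (fun i => -(PySem.List.pyGetD plays_list i 0)) (fun i => i)).getD 0
    (plays_list.sum, ro ++ [PySem.List.pyGetD ordered_list i1 0])
  else (plays_list.sum, ro)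

-- ===== PRECONDITION & SPEC =====
-- Pre_ excludes the inputs where A's indexing raises IndexError: empty plays_list,
-- a one-element plays_list with len(ordered_list) > 1 (best_order[1] raises), and
-- ordered_list shorter than plays_list (a best index can exceed ordered_list; on a
-- few such inputs A happens to return because the best indices are accidentally
-- small — those accidental returns are excluded with the crashing ones).
def Pre_sumandlist (plays_list : List Int) (ordered_list : List Int) : Prop :=
  plays_list ≠ [] ∧ plays_list.length ≤ ordered_list.length ∧
    (1 < ordered_list.length → 2 ≤ plays_list.length)
instance (plays_list : List Int) (ordered_list : List Int) : Decidable (Pre_sumandlist plays_list ordered_list) := by unfold Pre_sumandlist; infer_instance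
def pvWitness_sumandlist : List Int × List Int := ([3, 1, 4], [10, 20, 30])

def Spec_sumandlist (plays_list : List Int) (ordered_list : List Int) (out : Int × List Int) : Prop := out = sumandlist_alt plays_list ordered_list
instance (plays_list : List Int) (ordered_list : List Int) (out : Int × List Int) : Decidable (Spec_sumandlist plays_list ordered_list out) := by unfold Spec_sumandlist; infer_instance

-- ===== CLAIM (what is proved, stated in full; the proofs are below) =====
def Claim_equal_sumandlist : Prop := ∀ (plays_list : List Int) (ordered_list : List Int), Dom_sumandlist plays_list ordered_list → Pre_sumandlist plays_list ordered_list → Spec_sumandlist plays_list ordered_list (sumandlist plays_list ordered_list)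

-- ===== LEMMAS AND PROOFS =====

-- "index x beats index m" for Python's min with key (-plays[i], i): strictly larger
-- play count, or equal play count and smaller index.
def Better (plays_list : List Int) (x m : Int) : Prop :=
  PySem.List.pyGetD plays_list m 0 < PySem.List.pyGetD plays_list x 0 ∨
    (PySem.List.pyGetD plays_list x 0 = PySem.List.pyGetD plays_list m 0 ∧ x < m)

theorem better_irrefl (plays_list : List Int) (x : Int) : ¬ Better plays_list x x := by
  unfold Better; omega

theorem better_asymm (plays_list : List Int) (x m : Int) (h : Better plays_list x m) :
    ¬ Better plays_list m x := by
  unfold Better at *; omega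

theorem better_total (plays_list : List Int) (x m : Int) (h : x ≠ m) :
    Better plays_list x m ∨ Better plays_list m x := by
  unfold Better; omega

-- the accumulator step of min2? with key (-plays[i], i)
def m2step (plays_list : List Int) (acc : Option Int) (x : Int) : Option Int :=
  match acc with
  | none => some x
  | some m =>
    if (decide (-(PySem.List.pyGetD plays_list x 0) < -(PySem.List.pyGetD plays_list m 0))
        || !decide (-(PySem.List.pyGetD plays_list m 0) < -(PySem.List.pyGetD plays_list x 0))
           && decide (x < m)) = true
    then some x else some m

theorem min2?_eq_foldl (plays_list : List Int) (xs : List Int) :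
    PySem.List.min2? xs (fun i => -(PySem.List.pyGetD plays_list i 0)) (fun i => i)
      = xs.foldl (m2step plays_list) none := by
  simp only [PySem.List.min2?]
  congr 1
  funext acc x
  cases acc <;> rfl

theorem m2step_pos (plays_list : List Int) (m x : Int) (h : Better plays_list x m) :
    m2step plays_list (some m) x = some x := by
  simp only [m2step]; rw [if_pos]; unfold Better at h; simp; omega

theorem m2step_neg (plays_list : List Int) (m x : Int) (h : ¬ Better plays_list x m) :
    m2step plays_list (some m) x = some m := by
  simp only [m2step]; rw [if_neg]; unfold Better at h; simp; omega

theorem m2_stay (plays_list : List Int) (t : List Int) (c : Int)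
    (h : ∀ y ∈ t, ¬ Better plays_list y c) :
    t.foldl (m2step plays_list) (some c) = some c := by
  induction t with
  | nil => rfl
  | cons y t ih =>
    rw [List.foldl_cons, m2step_neg plays_list c y (h y (by simp))]
    exact ih (fun z hz => h z (by simp [hz]))

theorem m2_reach (plays_list : List Int) (t : List Int) :
    ∀ (m c : Int), c ∈ t → Better plays_list c m →
      (∀ y ∈ t, ¬ Better plays_list y c) →
      t.foldl (m2step plays_list) (some m) = some c := by
  induction t with
  | nil => intro m c hc _ _; simp at hc
  | cons y t ih =>
    intro m c hc hbet hall
    rw [List.foldl_cons]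
    by_cases hyc : y = c
    · subst hyc
      rw [m2step_pos plays_list m y hbet]
      exact m2_stay plays_list t y (fun z hz => hall z (by simp [hz]))
    · have hc' : c ∈ t := by
        rcases List.mem_cons.mp hc with h' | h'
        · exact absurd h'.symm hyc
        · exact h'
      have hcy : Better plays_list c y := by
        rcases better_total plays_list c y (fun h' => hyc h'.symm) with h' | h'
        · exact h'
        · exact absurd h' (hall y (by simp))
      by_cases hym : Better plays_list y m
      · rw [m2step_pos plays_list m y hym]
        exact ih y c hc' hcy (fun z hz => hall z (by simp [hz]))
      · rw [m2step_neg plays_list m y hym]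
        exact ih m c hc' hbet (fun z hz => hall z (by simp [hz]))

theorem min2?_eq_of_best (plays_list : List Int) (xs : List Int) (c : Int)
    (hc : c ∈ xs) (h : ∀ y ∈ xs, y ≠ c → Better plays_list c y) :
    PySem.List.min2? xs (fun i => -(PySem.List.pyGetD plays_list i 0)) (fun i => i) = some c := by
  rw [min2?_eq_foldl]
  have hall : ∀ y ∈ xs, ¬ Better plays_list y c := by
    intro y hy
    by_cases hyc : y = c
    · subst hyc; exact better_irrefl plays_list y
    · exact better_asymm plays_list c y (h y hy hyc)
  cases xs with
  | nil => simp at hc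
  | cons x t =>
    rw [List.foldl_cons]
    have hx : m2step plays_list none x = some x := rfl
    rw [hx]
    by_cases hxc : x = c
    · subst hxc; exact m2_stay plays_list t x (fun z hz => hall z (by simp [hz]))
    · have hc' : c ∈ t := by
        rcases List.mem_cons.mp hc with h' | h'
        · exact absurd h'.symm hxc
        · exact h'
      exact m2_reach plays_list t x c hc' (h x (by simp) hxc) (fun z hz => hall z (by simp [hz]))

-- specifications of the two best indices after processing indices [0, k)
def Spec0 (plays_list : List Int) (k i0 : Int) : Prop :=
  0 ≤ i0 ∧ i0 < k ∧ ∀ j : Int, 0 ≤ j → j < k → j ≠ i0 → Better plays_list i0 j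
def Spec1 (plays_list : List Int) (k i0 i1 : Int) : Prop :=
  0 ≤ i1 ∧ i1 < k ∧ i1 ≠ i0 ∧ ∀ j : Int, 0 ≤ j → j < k → j ≠ i0 → j ≠ i1 → Better plays_list i1 j

theorem step_cons (plays_list : List Int) (s i0 i1 : Int) (rest : List Int) (i : Int) :
    sumandlistStep plays_list (s, i0 :: i1 :: rest) i =
      (s + PySem.List.pyGetD plays_list i 0,
       if PySem.List.pyGetD plays_list i0 0 < PySem.List.pyGetD plays_list i 0 then i :: i0 :: i1 :: rest
       else if PySem.List.pyGetD plays_list i1 0 < PySem.List.pyGetD plays_list i 0 then i0 :: i :: rest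
       else i0 :: i1 :: rest) := by
  simp [sumandlistStep, PySem.List.pyGetD]
  split_ifs <;> rfl

theorem take_sum_succ (l : List Int) (k : Nat) (h : k < l.length) :
    (l.take (k+1)).sum = (l.take k).sum + PySem.List.pyGetD l (k : Int) 0 := by
  rw [PySem.List.pyGetD_natCast]
  have := List.sum_take_succ l k h
  simpa [List.getD, List.getElem?_eq_getElem h] using this

theorem loop_inv (plays_list : List Int) : ∀ k : Nat, 2 ≤ k → k ≤ plays_list.length →
    ∃ i0 i1 rest, (PySem.List.pyRange 0 (k : Int) 1).foldl (sumandlistStep plays_list) (0, [])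
        = ((plays_list.take k).sum, i0 :: i1 :: rest)
      ∧ Spec0 plays_list k i0 ∧ Spec1 plays_list k i0 i1 := by
  intro k
  induction k with
  | zero => omega
  | succ k ih =>
    intro hk2 hklen
    by_cases hk1 : k = 1
    · -- base case k+1 = 2
      subst hk1
      have hr : PySem.List.pyRange 0 ((2:Nat) : Int) 1 = [0, 1] := by decide
      have h1len : 1 < plays_list.length := by omega
      have h0len : 0 < plays_list.length := by omega
      have hsum : (plays_list.take 2).sum
          = 0 + PySem.List.pyGetD plays_list (0:Int) 0 + PySem.List.pyGetD plays_list (1:Int) 0 := by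
        have e0 := take_sum_succ plays_list 0 h0len
        have e1 := take_sum_succ plays_list 1 h1len
        push_cast at e0 e1
        simp at e0
        omega
      rw [hr]
      by_cases hcmp : PySem.List.pyGetD plays_list (0:Int) 0 < PySem.List.pyGetD plays_list (1:Int) 0
      · refine ⟨1, 0, [], ?_, ?_, ?_⟩
        · have hcmp' := hcmp
          simp only [PySem.List.pyGetD] at hcmp'
          simp [sumandlistStep, PySem.List.pyGetD, hcmp', hsum]
        · refine ⟨by omega, by omega, ?_⟩
          intro j hj0 hj2 hj1
          have : j = 0 := by omega
          subst this
          exact Or.inl hcmp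
        · refine ⟨by omega, by omega, by omega, ?_⟩
          intro j hj0 hj2 hj1 hj0'
          omega
      · refine ⟨0, 1, [], ?_, ?_, ?_⟩
        · have hcmp' := hcmp
          simp only [PySem.List.pyGetD] at hcmp'
          simp [sumandlistStep, PySem.List.pyGetD, hcmp', hsum]
        · refine ⟨by omega, by omega, ?_⟩
          intro j hj0 hj2 hj0'
          have : j = 1 := by omega
          subst this
          unfold Better
          omega
        · refine ⟨by omega, by omega, by omega, ?_⟩
          intro j hj0 hj2 hj0' hj1
          omega
    · -- inductive step, k ≥ 2
      obtain ⟨i0, i1, rest, heq, ⟨h00, h01, h02⟩, ⟨h10, h11, h12, h13⟩⟩ :=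
        ih (by omega) (by omega)
      have hsplit : PySem.List.pyRange 0 ((k+1 : Nat) : Int) 1
          = PySem.List.pyRange 0 (k : Int) 1 ++ [(k : Int)] := by
        push_cast
        exact PySem.List.pyRange_one_succ_right (by positivity)
      rw [hsplit, List.foldl_append, heq, List.foldl_cons, List.foldl_nil, step_cons]
      have hksum := take_sum_succ plays_list k (by omega)
      by_cases hA : PySem.List.pyGetD plays_list i0 0 < PySem.List.pyGetD plays_list (k : Int) 0
      · rw [if_pos hA]
        refine ⟨(k : Int), i0, i1 :: rest, by rw [hksum], ?_, ?_⟩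
        · refine ⟨by positivity, by push_cast; omega, ?_⟩
          intro j hj0 hjk hjne
          have hjk' : j < (k : Int) := by push_cast at hjk; omega
          by_cases hji0 : j = i0
          · subst hji0; exact Or.inl hA
          · have := h02 j hj0 hjk' hji0
            unfold Better at *
            omega
        · refine ⟨h00, by push_cast; omega, by omega, ?_⟩
          intro j hj0 hjk hjne hji0
          exact h02 j hj0 (by push_cast at hjk; omega) hji0
      · rw [if_neg hA]
        have hbi0k : Better plays_list i0 (k : Int) := by
          unfold Better; omega
        by_cases hB : PySem.List.pyGetD plays_list i1 0 < PySem.List.pyGetD plays_list (k : Int) 0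
        · rw [if_pos hB]
          refine ⟨i0, (k : Int), rest, by rw [hksum], ?_, ?_⟩
          · refine ⟨h00, by push_cast; omega, ?_⟩
            intro j hj0 hjk hjne
            by_cases hjk' : j = (k : Int)
            · subst hjk'; exact hbi0k
            · exact h02 j hj0 (by push_cast at hjk; omega) hjne
          · refine ⟨by positivity, by push_cast; omega, by omega, ?_⟩
            intro j hj0 hjk hji0 hjne
            have hjk' : j < (k : Int) := by push_cast at hjk; omega
            by_cases hji1 : j = i1
            · subst hji1; exact Or.inl hB
            · have := h13 j hj0 hjk' hji0 hji1
              unfold Better at *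
              omega
        · rw [if_neg hB]
          refine ⟨i0, i1, rest, by rw [hksum], ?_, ?_⟩
          · refine ⟨h00, by push_cast; omega, ?_⟩
            intro j hj0 hjk hjne
            by_cases hjk' : j = (k : Int)
            · subst hjk'; exact hbi0k
            · exact h02 j hj0 (by push_cast at hjk; omega) hjne
          · refine ⟨h10, by push_cast; omega, h12, ?_⟩
            intro j hj0 hjk hji0 hji1
            by_cases hjk' : j = (k : Int)
            · subst hjk'; unfold Better; omega
            · exact h13 j hj0 (by push_cast at hjk; omega) hji0 hji1

-- ===== VERDICT (by name: the statement is the Claim_ definition above) =====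
theorem sumandlist_spec : Claim_equal_sumandlist := by
  intro plays_list ordered_list hdom hpre
  obtain ⟨hne, hlen, him⟩ := hpre
  unfold Spec_sumandlist
  have hn1 : 1 ≤ plays_list.length := List.length_pos_of_ne_nil hne
  by_cases h2 : 2 ≤ plays_list.length
  · have hm : 1 < ordered_list.length := by omega
    obtain ⟨i0, i1, rest, heq, ⟨h00, h01, h02⟩, ⟨h10, h11, h12, h13⟩⟩ :=
      loop_inv plays_list plays_list.length h2 le_rfl
    have hB0 : PySem.List.min2? (PySem.List.pyRange 0 plays_list.length 1)
        (fun i => -(PySem.List.pyGetD plays_list i 0)) (fun i => i) = some i0 := by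
      apply min2?_eq_of_best
      · exact (PySem.List.mem_pyRange_one).mpr ⟨h00, h01⟩
      · intro y hy hyne
        have hy' := (PySem.List.mem_pyRange_one).mp hy
        exact h02 y hy'.1 hy'.2 hyne
    have hB1 : PySem.List.min2? ((PySem.List.pyRange 0 plays_list.length 1).filter (fun i => i != i0))
        (fun i => -(PySem.List.pyGetD plays_list i 0)) (fun i => i) = some i1 := by
      apply min2?_eq_of_best
      · refine List.mem_filter.mpr ⟨(PySem.List.mem_pyRange_one).mpr ⟨h10, h11⟩, by simp [h12]⟩
      · intro y hy hyne
        obtain ⟨hy1, hy2⟩ := List.mem_filter.mp hy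
        have hy' := (PySem.List.mem_pyRange_one).mp hy1
        have hyi0 : y ≠ i0 := by simpa using hy2
        exact h13 y hy'.1 hy'.2 hyi0 hyne
    simp only [PySem.List.pyGetD] at hB0 hB1
    simp only [sumandlist, sumandlist_alt, heq]
    simp [PySem.List.pyGetD, hm, hB0, hB1]
  · have hn : plays_list.length = 1 := by omega
    have hm : ordered_list.length = 1 := by
      by_cases h : 1 < ordered_list.length
      · exact absurd (him h) (by omega)
      · omega
    obtain ⟨a, ha⟩ := List.length_eq_one_iff.mp hn
    obtain ⟨b, hb⟩ := List.length_eq_one_iff.mp hm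
    subst ha hb
    have hr : PySem.List.pyRange 0 1 1 = [0] := by decide
    simp [sumandlist, sumandlist_alt, sumandlistStep, hr, PySem.List.pyGetD, PySem.List.min2?]
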